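-- pv_equiv track=rewrite | github.com/estela-ramirez/reactexpress | backend/data/condenseCSV.py | createHeaderDict
-- ===== SOURCE A (Python) =====
-- def createHeaderDict(header: list) -> dict:
--     header_count = dict()
--     for col in header:
--         prefix = col[0:4]
--         if prefix in header_count:
--             header_count[prefix] += 1
--         else:
--             header_count[prefix] = 1
--     return header_count
-- ===== SOURCE B (Python) =====
-- def createHeaderDict(header: list) -> dict:
--     prefixes = [col[0:4] for col in header]
--     result = {}
--     while prefixes:
--         p = prefixes[0]
--         rest = [q for q in prefixes if q != p]
--         result[p] = len(prefixes) - len(rest)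
--         prefixes = rest
--     return result
-- ===== Notes on version B (the rewrite author's own statement) =====
-- stated objective: alternative
-- what changed: Replaces A's single-pass dict-membership accumulation with a partition loop: repeatedly take the first remaining prefix, count and delete all its occurrences in one filtering pass, and assign each key exactly once; first-occurrence key order is preserved because filtering keeps relative order.
import Mathlib
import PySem

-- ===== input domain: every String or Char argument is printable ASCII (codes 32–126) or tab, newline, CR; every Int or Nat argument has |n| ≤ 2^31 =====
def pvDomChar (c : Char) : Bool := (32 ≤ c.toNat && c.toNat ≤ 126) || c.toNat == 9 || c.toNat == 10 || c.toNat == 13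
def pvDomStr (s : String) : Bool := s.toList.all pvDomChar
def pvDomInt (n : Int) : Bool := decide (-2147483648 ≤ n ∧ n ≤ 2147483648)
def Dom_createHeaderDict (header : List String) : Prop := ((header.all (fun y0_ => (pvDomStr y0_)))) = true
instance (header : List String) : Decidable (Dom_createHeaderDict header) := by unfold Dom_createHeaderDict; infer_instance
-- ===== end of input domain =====

-- B replaces A's single-pass dict-membership accumulation with a partition loop (count and delete
-- all occurrences of the first remaining prefix, repeat on the rest); objective: alternative.

-- ===== PORT A =====
-- A: header_count = {}; for col in header: prefix = col[0:4];
--    if prefix in header_count: header_count[prefix] += 1 else: header_count[prefix] = 1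
--    ('prefix' is a Lean keyword; it is named pfx here)
def createHeaderDict (header : List String) : List (String × Int) :=
  (header.foldl
    (fun (d : PySem.Dict String Int) col =>
      let pfx := PySem.Str.slice col (some 0) (some 4)
      if d.contains pfx then
        d.insert pfx (d.getD pfx 0 + 1)
      else
        d.insert pfx 1)
    PySem.Dict.empty).items

-- ===== PORT B =====
-- B's while loop: while prefixes: p = prefixes[0]; rest = [q for q in prefixes if q != p];
--                 result[p] = len(prefixes) - len(rest); prefixes = rest
def tallyWhileB : List String → PySem.Dict String Int → PySem.Dict String Int
  | [], result => result
  | p :: tl, result =>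
    let rest := (p :: tl).filter (fun q => q != p)
    tallyWhileB rest (result.insert p (((p :: tl).length : Int) - (rest.length : Int)))
termination_by ps _ => ps.length
decreasing_by
  have h : (p :: tl).filter (fun q => q != p) = tl.filter (fun q => q != p) := by simp
  have := List.length_filter_le (fun q => q != p) tl
  simp only [h, List.length_cons]; omega

-- B: prefixes = [col[0:4] for col in header]; result = {}; while loop above; return result
def createHeaderDict_alt (header : List String) : List (String × Int) :=
  (tallyWhileB (header.map (fun col => PySem.Str.slice col (some 0) (some 4)))
    PySem.Dict.empty).items

-- ===== PRECONDITION & SPEC =====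
def Spec_createHeaderDict (header : List String) (out : List (String × Int)) : Prop := out = createHeaderDict_alt header
instance (header : List String) (out : List (String × Int)) : Decidable (Spec_createHeaderDict header out) := by unfold Spec_createHeaderDict; infer_instance

-- ===== CLAIM (what is proved, stated in full; the proofs are below) =====
def Claim_equal_createHeaderDict : Prop := ∀ (header : List String), Dom_createHeaderDict header → Spec_createHeaderDict header (createHeaderDict header)

-- ===== LEMMAS AND PROOFS =====

-- A's branchy loop body is, step for step, the 'insert (getD + 1)' counter step:
-- when the key is absent, getD returns the default 0, so 'insert 1' = 'insert (0 + 1)'.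
theorem createHeaderDict_foldl_eq_counter (xs : List String) (d : PySem.Dict String Int) :
    xs.foldl
      (fun (d : PySem.Dict String Int) p =>
        if d.contains p then d.insert p (d.getD p 0 + 1) else d.insert p 1) d
    = xs.foldl (fun (d : PySem.Dict String Int) p => d.insert p (d.getD p 0 + 1)) d := by
  induction xs generalizing d with
  | nil => rfl
  | cons x xs ih =>
    simp only [List.foldl_cons]
    by_cases h : d.contains x = true
    · rw [if_pos h, ih]
    · have h' : d.contains x = false := by simpa using h
      have hg : d.get? x = none := by simp [pysem, h']
      rw [if_neg h, show d.getD x 0 = 0 by simp [PySem.Dict.getD, hg], zero_add] at *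
      exact ih _

-- Folding Set.add with p already in the accumulator ignores every later p.
theorem foldl_add_mem_filter (p : String) :
    ∀ (tl : List String) (s : PySem.Set String), p ∈ s →
      tl.foldl PySem.Set.add s = (tl.filter (fun q => q != p)).foldl PySem.Set.add s := by
  intro tl
  induction tl with
  | nil => intro s _; rfl
  | cons x tl ih =>
    intro s hp
    by_cases hx : x = p
    · subst hx
      have hadd : PySem.Set.add s x = s := by
        simp [PySem.Set.add, PySem.Set.contains, hp]
      simp [List.foldl_cons, hadd, ih s hp]
    · have hmem : p ∈ PySem.Set.add s x := (PySem.Set.mem_add s x p).mpr (Or.inl hp)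
      simp [hx, List.foldl_cons, ih _ hmem]

-- Folding Set.add over a list containing no p keeps a leading p in front.
theorem foldl_add_cons_of_not_mem (p : String) :
    ∀ (l : List String), (∀ q ∈ l, q ≠ p) → ∀ (s : PySem.Set String),
      l.foldl PySem.Set.add (p :: s) = p :: l.foldl PySem.Set.add s := by
  intro l
  induction l with
  | nil => intro _ s; rfl
  | cons x l ih =>
    intro h s
    have hx : x ≠ p := h x (by simp)
    have hc : (p :: s).contains x = s.contains x := by
      simp only [List.contains_cons, show (x == p) = false by simpa using hx, Bool.false_or]
      rfl
    have hstep : PySem.Set.add (p :: s) x = p :: PySem.Set.add s x := by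
      simp only [PySem.Set.add, PySem.Set.contains, hc]
      split <;> simp
    simp only [List.foldl_cons, hstep]
    exact ih (fun q hq => h q (by simp [hq])) _

-- First-occurrence dedup peels its head: ofList (p :: tl) = p :: ofList (tl minus all p's).
theorem ofList_cons_filter (p : String) (tl : List String) :
    PySem.Set.ofList (p :: tl) = p :: PySem.Set.ofList (tl.filter (fun q => q != p)) := by
  have h2 : ∀ q ∈ tl.filter (fun q => q != p), q ≠ p := by
    intro q hq
    have := List.of_mem_filter hq
    simpa using this
  calc PySem.Set.ofList (p :: tl)
      = tl.foldl PySem.Set.add [p] := by simp [PySem.Set.ofList]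
    _ = (tl.filter (fun q => q != p)).foldl PySem.Set.add [p] :=
        foldl_add_mem_filter p tl [p] (by simp)
    _ = p :: (tl.filter (fun q => q != p)).foldl PySem.Set.add [] :=
        foldl_add_cons_of_not_mem p _ h2 []
    _ = p :: PySem.Set.ofList (tl.filter (fun q => q != p)) := rfl

-- Removing all p's removes exactly count p elements.
theorem filter_length_count (l : List String) (p : String) :
    (l.filter (fun q => q != p)).length + l.count p = l.length := by
  induction l with
  | nil => simp
  | cons x tl ih =>
    by_cases h : x = p <;> simp only [bne] at ih ⊢ <;> simp [h] <;> omega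

-- Counting a non-p key is unaffected by removing the p's.
theorem count_filter_ne (l : List String) (k p : String) (h : k ≠ p) :
    (l.filter (fun q => q != p)).count k = l.count k := by
  rw [List.count_filter]; simp [h]

-- B's partition loop appends, to the keys assigned so far, the dedup-ordered count table of the
-- remaining prefixes (strong induction on length; every remaining prefix is a fresh dict key).
theorem tallyWhileB_eq_aux : ∀ (n : Nat) (ps : List String), ps.length ≤ n →
    ∀ (d : PySem.Dict String Int), (∀ q ∈ ps, d.contains q = false) →
    (tallyWhileB ps d).items
      = d.items ++ (PySem.Set.ofList ps).map (fun k => (k, (ps.count k : Int))) := by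
  intro n
  induction n with
  | zero =>
    intro ps h d _
    have : ps = [] := List.eq_nil_of_length_eq_zero (Nat.le_zero.mp h)
    subst this; simp [tallyWhileB]
  | succ n ih =>
    intro ps h d hfresh
    match ps with
    | [] => simp [tallyWhileB]
    | p :: tl =>
      have hfil : (p :: tl).filter (fun q => q != p) = tl.filter (fun q => q != p) := by simp
      have hp : d.contains p = false := hfresh p (by simp)
      have hins : (d.insert p (((p :: tl).length : Int)
            - ((tl.filter (fun q => q != p)).length : Int))).items
          = d.items ++ [(p, ((p :: tl).length : Int)
            - ((tl.filter (fun q => q != p)).length : Int))] := by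
        simp [PySem.Dict.insert, hp]
      have hfresh' : ∀ q ∈ tl.filter (fun q => q != p),
          (d.insert p (((p :: tl).length : Int)
            - ((tl.filter (fun q => q != p)).length : Int))).contains q = false := by
        intro q hq
        have hne : q ≠ p := by simpa using List.of_mem_filter hq
        have hq0 : d.contains q = false := hfresh q (by simp [List.mem_of_mem_filter hq])
        simp only [PySem.Dict.contains_eq_decide_mem_keys, PySem.Dict.mem_keys_insert, hne,
          false_or, decide_eq_false_iff_not] at hq0 ⊢
        exact hq0
      have hle : (tl.filter (fun q => q != p)).length ≤ n := by
        have := List.length_filter_le (fun q => q != p) tl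
        simp only [List.length_cons] at h; omega
      rw [tallyWhileB]
      simp only [hfil]
      rw [ih _ hle _ hfresh', hins, ofList_cons_filter]
      have hhead : ((p :: tl).length : Int) - ((tl.filter (fun q => q != p)).length : Int)
          = ((p :: tl).count p : Int) := by
        have hlen := filter_length_count (p :: tl) p
        simp only [hfil, List.length_cons] at hlen ⊢
        push_cast
        omega
      have htail : (PySem.Set.ofList (tl.filter (fun q => q != p))).map
            (fun k => (k, ((tl.filter (fun q => q != p)).count k : Int)))
          = (PySem.Set.ofList (tl.filter (fun q => q != p))).map
            (fun k => (k, ((p :: tl).count k : Int))) := by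
        apply List.map_congr_left
        intro k hk
        have hk' : k ∈ tl.filter (fun q => q != p) := (PySem.Set.mem_ofList _ k).mp hk
        have hne : k ≠ p := by simpa using List.of_mem_filter hk'
        have h1 : (p :: tl).count k = tl.count k := by simp [Ne.symm hne]
        rw [count_filter_ne tl k p hne, h1]
      rw [hhead, htail]
      simp [List.map_cons]

-- ===== VERDICT (by name: the statement is the Claim_ definition above) =====
theorem createHeaderDict_spec : Claim_equal_createHeaderDict := by
  intro header _
  unfold Spec_createHeaderDict createHeaderDict createHeaderDict_alt
  have h1 : (header.foldl
      (fun (d : PySem.Dict String Int) col =>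
        let pfx := PySem.Str.slice col (some 0) (some 4)
        if d.contains pfx then d.insert pfx (d.getD pfx 0 + 1) else d.insert pfx 1)
      PySem.Dict.empty)
    = (header.map (fun col => PySem.Str.slice col (some 0) (some 4))).foldl
        (fun (d : PySem.Dict String Int) p =>
          if d.contains p then d.insert p (d.getD p 0 + 1) else d.insert p 1)
        PySem.Dict.empty := by
    rw [List.foldl_map]
  rw [h1, createHeaderDict_foldl_eq_counter,
      PySem.Dict.foldl_insert_getD_add_one_eq_counter,
      PySem.Dict.items_counter,
      tallyWhileB_eq_aux _ _ (Nat.le_refl _) _ (by intro q _; rfl)]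
  rfl
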